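-- pv_equiv track=rewrite | github.com/asweigart/programmedpatterns | book/visualpatterns.py | pattern70
-- ===== SOURCE A (Python) =====
-- def pattern70(step):
--     width = 3
--     height = 3
--     for i in range(2, step + 1):
--         if i % 2 == 0:
--             height += 2
--         elif i % 2 == 1:
--             width += 2
--             height += 1
--     row = ('O' * width) + '\n'
--     pattern = row * height
--     return pattern
-- ===== SOURCE B (Python) =====
-- def pattern70(step):
--     odd = max(0, (step - 1) // 2)   # count of odd i in 2..step
--     even = max(0, step // 2)        # count of even i in 2..step
--     width = 3 + 2 * odd
--     height = 3 + 2 * even + odd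
--     row = ('O' * width) + '\n'
--     return row * height
-- ===== Notes on version B (the rewrite author's own statement) =====
-- stated objective: simpler
-- what changed: Replaced the range(2, step+1) accumulation loop by closed-form counts of the odd and even indices (width = 3 + 2*odd, height = 3 + 2*even + odd, clamped to 0 for step < 2); runtime is dominated by building the output string, so no speedup.
import Mathlib
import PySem

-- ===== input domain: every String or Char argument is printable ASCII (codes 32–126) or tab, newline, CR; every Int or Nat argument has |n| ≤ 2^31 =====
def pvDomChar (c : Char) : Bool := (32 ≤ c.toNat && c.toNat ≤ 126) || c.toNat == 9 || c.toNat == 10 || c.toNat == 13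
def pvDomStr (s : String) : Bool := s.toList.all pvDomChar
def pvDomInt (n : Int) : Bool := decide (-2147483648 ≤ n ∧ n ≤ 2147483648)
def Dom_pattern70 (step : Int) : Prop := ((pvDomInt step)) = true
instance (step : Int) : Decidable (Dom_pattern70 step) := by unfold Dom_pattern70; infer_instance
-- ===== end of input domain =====

-- B replaces A's range(2, step+1) accumulation loop by closed-form counts of the odd/even
-- indices in 2..step (simpler: arithmetic instead of a loop to compute the dimensions).


-- ===== PORT A =====
-- loop body: state (width, height); 'O'*w + '\n' and row*h built as Char lists
def pattern70 (step : Int) : String :=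
  let wh := (PySem.List.pyRange 2 (step + 1) 1).foldl
    (fun (s : Int × Int) i =>
      if PySem.Int.mod i 2 = 0 then (s.1, s.2 + 2)
      else if PySem.Int.mod i 2 = 1 then (s.1 + 2, s.2 + 1)
      else s) (3, 3)
  let row := List.replicate wh.1.toNat 'O' ++ ['\n']
  String.ofList (List.replicate wh.2.toNat row).flatten

-- ===== PORT B =====
def pattern70_alt (step : Int) : String :=
  let odd := max 0 (PySem.Int.floordiv (step - 1) 2)
  let even := max 0 (PySem.Int.floordiv step 2)
  let width := 3 + 2 * odd
  let height := 3 + 2 * even + odd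
  let row := List.replicate width.toNat 'O' ++ ['\n']
  String.ofList (List.replicate height.toNat row).flatten

-- ===== PRECONDITION & SPEC =====
def Spec_pattern70 (step : Int) (out : String) : Prop := out = pattern70_alt step
instance (step : Int) (out : String) : Decidable (Spec_pattern70 step out) := by unfold Spec_pattern70; infer_instance

-- ===== CLAIM (what is proved, stated in full; the proofs are below) =====
def Claim_equal_pattern70 : Prop := ∀ (step : Int), Dom_pattern70 step → Spec_pattern70 step (pattern70 step)

-- ===== LEMMAS AND PROOFS =====

-- A's loop in closed form: after running over range(2, n+1) the state is
-- (3 + 2*((n-1)/2), 3 + 2*(n/2) + (n-1)/2) (Nat division), for any n ≥ 1.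
theorem pattern70_loop_closed (n : Nat) (hn : 1 ≤ n) :
    (PySem.List.pyRange 2 ((n : Int) + 1) 1).foldl
      (fun (s : Int × Int) i =>
        if PySem.Int.mod i 2 = 0 then (s.1, s.2 + 2)
        else if PySem.Int.mod i 2 = 1 then (s.1 + 2, s.2 + 1)
        else s) (3, 3)
    = (3 + 2 * (((n - 1) / 2 : Nat) : Int), 3 + 2 * ((n / 2 : Nat) : Int) + (((n - 1) / 2 : Nat) : Int)) := by
  induction n with
  | zero => omega
  | succ m ih =>
    by_cases hm : 1 ≤ m
    · have h2 : (2 : Int) ≤ (m : Int) + 1 := by exact_mod_cast Nat.succ_le_succ hm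
      have hcast : ((m + 1 : Nat) : Int) + 1 = ((m : Int) + 1) + 1 := by push_cast; ring
      rw [hcast, PySem.List.pyRange_one_succ_right h2, List.foldl_append, ih hm]
      simp only [List.foldl]
      rcases Nat.even_or_odd (m + 1) with he | ho
      · have hmod : PySem.Int.mod ((m : Int) + 1) 2 = 0 := by
          rw [PySem.Int.mod_eq_zero_iff_dvd]
          exact_mod_cast (Int.natCast_dvd_natCast (m := 2)).mpr he.two_dvd
        obtain ⟨k, hk⟩ := he
        have h1 : ((m + 1) / 2 : Nat) = (m / 2 : Nat) + 1 := by omega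
        have h2' : ((m + 1 - 1) / 2 : Nat) = ((m - 1) / 2 : Nat) := by omega
        simp only [hmod, h1, h2']
        norm_num [Prod.ext_iff] <;> omega
      · have hmod : PySem.Int.mod ((m : Int) + 1) 2 = 1 := by
          rcases PySem.Int.mod_two_eq ((m : Int) + 1) with h | h
          · exfalso
            rw [PySem.Int.mod_eq_zero_iff_dvd] at h
            have hd : (2 : Nat) ∣ (m + 1) := by exact_mod_cast h
            obtain ⟨j, hj⟩ := ho
            omega
          · exact h
        have hne : ¬ PySem.Int.mod ((m : Int) + 1) 2 = 0 := by rw [hmod]; omega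
        obtain ⟨k, hk⟩ := ho
        have h1 : ((m + 1) / 2 : Nat) = (m / 2 : Nat) := by omega
        have h2' : ((m + 1 - 1) / 2 : Nat) = ((m - 1) / 2 : Nat) + 1 := by omega
        simp only [hmod, h1, h2']
        norm_num [Prod.ext_iff] <;> omega
    · have hm0 : m = 0 := by omega
      subst hm0
      decide

-- the empty-loop case: range(2, step+1) is empty when step ≤ 1
theorem pattern70_range_empty (step : Int) (h : step ≤ 1) :
    PySem.List.pyRange 2 (step + 1) 1 = [] := by
  simp [PySem.List.pyRange]
  omega

-- ===== VERDICT (by name: the statement is the Claim_ definition above) =====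
theorem pattern70_spec : Claim_equal_pattern70 := by
  intro step _
  show pattern70 step = pattern70_alt step
  by_cases hle : step ≤ 1
  · unfold pattern70 pattern70_alt
    rw [pattern70_range_empty step hle]
    have ho : max 0 (PySem.Int.floordiv (step - 1) 2) = 0 := by
      have h1 : PySem.Int.floordiv (step - 1) 2 < 1 :=
        (PySem.Int.floordiv_lt_iff_lt_mul (by omega)).mpr (by omega)
      omega
    have he : max 0 (PySem.Int.floordiv step 2) = 0 := by
      have h1 : PySem.Int.floordiv step 2 < 1 :=
        (PySem.Int.floordiv_lt_iff_lt_mul (by omega)).mpr (by omega)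
      omega
    simp only [ho, he, List.foldl]
    norm_num
  · have hge : 1 < step := by omega
    obtain ⟨n, hn⟩ : ∃ n : Nat, step = (n : Int) := ⟨step.toNat, by omega⟩
    have hn1 : 1 ≤ n := by omega
    unfold pattern70 pattern70_alt
    subst hn
    rw [pattern70_loop_closed n hn1]
    have ho : max 0 (PySem.Int.floordiv ((n : Int) - 1) 2) = (((n - 1) / 2 : Nat) : Int) := by
      have hc : ((n : Int) - 1) = ((n - 1 : Nat) : Int) := by omega
      have hd : PySem.Int.floordiv ((n - 1 : Nat) : Int) 2 = (((n - 1) / 2 : Nat) : Int) := by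
        exact_mod_cast PySem.Int.floordiv_natCast (n - 1) 2
      rw [hc, hd]; omega
    have he : max 0 (PySem.Int.floordiv (n : Int) 2) = ((n / 2 : Nat) : Int) := by
      have hd : PySem.Int.floordiv ((n : Nat) : Int) 2 = ((n / 2 : Nat) : Int) := by
        exact_mod_cast PySem.Int.floordiv_natCast n 2
      rw [hd]; omega
    simp only [ho, he]
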